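-- pv_equiv track=rewrite | github.com/muhammedrinshid/TimetableBackEnd | base/api/views/class_room_views.py | get_next_division_name
-- ===== SOURCE A (Python) =====
-- def get_next_division_name(existing_divisions):
--     # If there are no existing divisions, start with 'A'
--     if not existing_divisions:
--         return 'A'
--
--     for i in range(26):
--         div_name = chr(65 + i)  # A to Z
--         if div_name not in existing_divisions:
--             return div_name
--
--     # If all single letters are used, start with AA, AB, etc.
--     prefix = 'A'
--     while True:
--         for i in range(26):
--             div_name = prefix + chr(65 + i)
--             if div_name not in existing_divisions:
--                 return div_name
--         prefix = chr(ord(prefix) + 1)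
-- ===== SOURCE B (Python) =====
-- def _rank(s):
--     # index of a candidate name in the generated sequence, or None if s can never be generated
--     if len(s) == 1 and 'A' <= s <= 'Z':
--         return ord(s) - 65
--     if len(s) == 2 and s[0] >= 'A' and 'A' <= s[1] <= 'Z':
--         return 26 + 26 * (ord(s[0]) - 65) + (ord(s[1]) - 65)
--     return None
--
-- def get_next_division_name(existing_divisions):
--     taken = set(filter(lambda r: r is not None, map(_rank, existing_divisions)))
--     n = 0
--     for r in sorted(taken):
--         if r == n:
--             n += 1
--     if n < 26:
--         return chr(65 + n)
--     q, r = divmod(n - 26, 26)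
--     return chr(65 + q) + chr(65 + r)
-- ===== Notes on version B (the rewrite author's own statement) =====
-- stated objective: alternative
-- what changed: Replaces A's candidate enumeration (A-Z scan then nested prefix loop, each candidate membership-tested against the list) by a rank-and-mex algorithm: each existing name is mapped once to its index in the name sequence, the index set is sorted, and a single scan finds the first gap, which is converted back to a name.
import Mathlib
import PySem

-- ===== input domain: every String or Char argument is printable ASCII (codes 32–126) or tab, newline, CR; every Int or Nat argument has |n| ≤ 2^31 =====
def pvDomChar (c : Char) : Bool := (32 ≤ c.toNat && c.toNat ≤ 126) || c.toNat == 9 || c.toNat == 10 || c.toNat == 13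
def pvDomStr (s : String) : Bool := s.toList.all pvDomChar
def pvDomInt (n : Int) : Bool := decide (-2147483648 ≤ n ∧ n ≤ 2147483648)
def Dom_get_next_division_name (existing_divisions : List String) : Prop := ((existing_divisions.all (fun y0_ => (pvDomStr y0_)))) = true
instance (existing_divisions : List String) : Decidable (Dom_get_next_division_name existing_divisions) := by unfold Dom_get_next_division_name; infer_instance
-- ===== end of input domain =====

-- B replaces A's candidate enumeration (guard, A–Z scan, nested prefix while-loop, each
-- candidate scanned against the list) by ranking each existing name once, sorting the rank
-- set and scanning it for the first gap (mex), then converting that rank back to a name.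

-- ===== PORT A =====
-- A's 'for … return' loops are findSome? over List.range 26; the unbounded 'while True'
-- is fuel recursion over the prefix passes ("" only when fuel runs out, which no ASCII
-- input reaches: after 62 passes the prefix character leaves printable ASCII).
def pvAWhile (xs : List String) : Nat → Char → String
  | 0, _ => ""
  | f+1, p =>
    match (List.range 26).findSome? (fun i =>
        let d : String := String.ofList [p, Char.ofNat (65 + i)]
        if xs.contains d then none else some d) with
    | some d => d
    | none => pvAWhile xs f (Char.ofNat (p.toNat + 1))

def get_next_division_name (existing_divisions : List String) : String :=
  if existing_divisions = [] then "A"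
  else
    match (List.range 26).findSome? (fun i =>
        let d : String := String.ofList [Char.ofNat (65 + i)]
        if existing_divisions.contains d then none else some d) with
    | some d => d
    | none => pvAWhile existing_divisions 1000 'A'

-- ===== PORT B =====
-- _rank: index of a candidate name in the generated sequence, or none
def pvRank? (s : String) : Option Nat :=
  match s.toList with
  | [c] => if 65 ≤ c.toNat ∧ c.toNat ≤ 90 then some (c.toNat - 65) else none
  | [p, c] => if 65 ≤ p.toNat ∧ 65 ≤ c.toNat ∧ c.toNat ≤ 90 then
      some (26 + 26 * (p.toNat - 65) + (c.toNat - 65)) else none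
  | _ => none

def get_next_division_name_alt (existing_divisions : List String) : String :=
  -- taken = set(filter(lambda r: r is not None, map(_rank, existing_divisions)))
  let taken : PySem.Set Nat := PySem.Set.ofList (existing_divisions.filterMap pvRank?)
  -- n = 0; for r in sorted(taken): if r == n: n += 1
  let n := (PySem.List.sorted taken (fun x => x) false).foldl
             (fun n r => if r = n then n + 1 else n) 0
  if n < 26 then String.ofList [Char.ofNat (65 + n)]
  else String.ofList [Char.ofNat (65 + (n - 26) / 26), Char.ofNat (65 + (n - 26) % 26)]

-- ===== PRECONDITION & SPEC =====
def Spec_get_next_division_name (existing_divisions : List String) (out : String) : Prop := out = get_next_division_name_alt existing_divisions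
instance (existing_divisions : List String) (out : String) : Decidable (Spec_get_next_division_name existing_divisions out) := by unfold Spec_get_next_division_name; infer_instance

-- ===== CLAIM (what is proved, stated in full; the proofs are below) =====
def Claim_equal_get_next_division_name : Prop := ∀ (existing_divisions : List String), Dom_get_next_division_name existing_divisions → Spec_get_next_division_name existing_divisions (get_next_division_name existing_divisions)

-- ===== LEMMAS AND PROOFS =====

-- the n-th name of the sequence both programs are about (identical to B's final conversion)
def pvName (n : Nat) : String :=
  if n < 26 then String.ofList [Char.ofNat (65 + n)]
  else String.ofList [Char.ofNat (65 + (n - 26) / 26), Char.ofNat (65 + (n - 26) % 26)]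

-- first available name among the given indices, in order
def pvFirst (xs : List String) (ns : List Nat) : Option String :=
  ns.findSome? (fun n => if xs.contains (pvName n) then none else some (pvName n))

theorem pv_findSome?_congr {α β : Type} (l : List α) (f g : α → Option β)
    (h : ∀ a ∈ l, f a = g a) : l.findSome? f = l.findSome? g := by
  induction l with
  | nil => rfl
  | cons a t ih =>
    simp only [List.findSome?]
    rw [h a (by simp)]
    cases g a with
    | some b => rfl
    | none => exact ih (fun x hx => h x (by simp [hx]))

theorem pv_toNat_ofNat (n : Nat) (h : n < 55296) : (Char.ofNat n).toNat = n := by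
  simp [Char.ofNat, Nat.isValidChar, h, Char.ofNatAux]

theorem pvName_small (i : Nat) (h : i < 26) :
    pvName i = String.ofList [Char.ofNat (65 + i)] := by
  simp [pvName, h]

theorem pvName_big (k i : Nat) (h : i < 26) :
    pvName (26 + 26 * k + i) = String.ofList [Char.ofNat (65 + k), Char.ofNat (65 + i)] := by
  have h1 : ¬ (26 + 26 * k + i < 26) := by omega
  have h2 : 26 + 26 * k + i - 26 = 26 * k + i := by omega
  simp only [pvName, h1, if_false, h2]
  rw [Nat.mul_add_div (by omega), Nat.mul_add_mod,
    Nat.div_eq_of_lt h, Nat.mod_eq_of_lt h, Nat.add_zero]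

-- rank is a left inverse of the name sequence (for every index A's port can try)
theorem pvRank?_pvName (n : Nat) (h : n < 26026) : pvRank? (pvName n) = some n := by
  by_cases h26 : n < 26
  · rw [pvName_small n h26]
    have ht : (String.ofList [Char.ofNat (65 + n)]).toList = [Char.ofNat (65 + n)] := by
      simp
    simp only [pvRank?, ht, pv_toNat_ofNat (65 + n) (by omega)]
    have : 65 ≤ 65 + n ∧ 65 + n ≤ 90 := by omega
    simp [this]
  · obtain ⟨k, i, hi, rfl⟩ : ∃ k i, i < 26 ∧ n = 26 + 26 * k + i :=
      ⟨(n - 26) / 26, (n - 26) % 26, Nat.mod_lt _ (by omega), by omega⟩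
    rw [pvName_big k i hi]
    have ht : (String.ofList [Char.ofNat (65 + k), Char.ofNat (65 + i)]).toList
        = [Char.ofNat (65 + k), Char.ofNat (65 + i)] := by simp
    simp only [pvRank?, ht, pv_toNat_ofNat (65 + k) (by omega),
      pv_toNat_ofNat (65 + i) (by omega)]
    have : 65 ≤ 65 + k ∧ 65 ≤ 65 + i ∧ 65 + i ≤ 90 := by omega
    simp [this]

-- and every string with a rank IS the name of that rank
theorem pvName_pvRank? (s : String) (n : Nat) (h : pvRank? s = some n) : s = pvName n := by
  have hs : s = String.ofList s.toList := by simp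
  unfold pvRank? at h
  rcases hl : s.toList with - | ⟨c, - | ⟨c2, - | ⟨c3, t⟩⟩⟩ <;> rw [hl] at h hs
  · simp at h
  · replace h : (if 65 ≤ c.toNat ∧ c.toNat ≤ 90 then some (c.toNat - 65) else none) = some n := h
    split at h
    · rename_i hc
      injection h with h
      subst h
      rw [pvName_small _ (by omega)]
      rw [show 65 + (c.toNat - 65) = c.toNat by omega, Char.ofNat_toNat, hs]
    · simp at h
  · replace h : (if 65 ≤ c.toNat ∧ 65 ≤ c2.toNat ∧ c2.toNat ≤ 90 then
        some (26 + 26 * (c.toNat - 65) + (c2.toNat - 65)) else none) = some n := h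
    split at h
    · rename_i hc
      injection h with h
      subst h
      rw [pvName_big (c.toNat - 65) (c2.toNat - 65) (by omega)]
      rw [show 65 + (c.toNat - 65) = c.toNat by omega,
        show 65 + (c2.toNat - 65) = c2.toNat by omega,
        Char.ofNat_toNat, Char.ofNat_toNat, hs]
    · simp at h
  · simp at h

-- ranks of domain strings are at most 1637 (the largest rank a printable-ASCII string can have)
theorem pvRank?_le (s : String) (n : Nat) (hd : pvDomStr s = true)
    (h : pvRank? s = some n) : n ≤ 1637 := by
  have hall : ∀ c ∈ s.toList, c.toNat ≤ 126 := by
    intro c hc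
    have := List.all_eq_true.mp hd c hc
    simp [pvDomChar] at this
    omega
  unfold pvRank? at h
  rcases hl : s.toList with - | ⟨c, - | ⟨c2, - | ⟨c3, t⟩⟩⟩ <;> rw [hl] at h
  · simp at h
  · replace h : (if 65 ≤ c.toNat ∧ c.toNat ≤ 90 then some (c.toNat - 65) else none) = some n := h
    split at h
    · rename_i hc; injection h with h; omega
    · simp at h
  · have h1 := hall c (by rw [hl]; simp)
    have h2 := hall c2 (by rw [hl]; simp)
    replace h : (if 65 ≤ c.toNat ∧ 65 ≤ c2.toNat ∧ c2.toNat ≤ 90 then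
        some (26 + 26 * (c.toNat - 65) + (c2.toNat - 65)) else none) = some n := h
    split at h
    · rename_i hc; injection h with h; omega
    · simp at h
  · simp at h

-- the mex fold: on a strictly increasing list it computes the least absent value ≥ n0
theorem pv_mex_fold (l : List Nat) (hl : l.Pairwise (· < ·)) :
    ∀ n0, (∀ r ∈ l, n0 ≤ r) →
      n0 ≤ l.foldl (fun n r => if r = n then n + 1 else n) n0 ∧
      l.foldl (fun n r => if r = n then n + 1 else n) n0 ∉ l ∧
      ∀ k, n0 ≤ k → k < l.foldl (fun n r => if r = n then n + 1 else n) n0 → k ∈ l := by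
  induction l with
  | nil => intro n0 _; simp
  | cons r t ih =>
    intro n0 hge
    have hrt : ∀ x ∈ t, r < x := (List.pairwise_cons.mp hl).1
    have ht : t.Pairwise (· < ·) := (List.pairwise_cons.mp hl).2
    by_cases hr : r = n0
    · subst hr
      have hge' : ∀ x ∈ t, r + 1 ≤ x := fun x hx => hrt x hx
      obtain ⟨h1, h2, h3⟩ := ih ht (r + 1) hge'
      simp only [List.foldl_cons, if_true]
      refine ⟨by omega, ?_, ?_⟩
      · intro hmem
        rcases List.mem_cons.mp hmem with h | h
        · omega
        · exact h2 h
      · intro k hk1 hk2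
        by_cases hk : k = r
        · simp [hk]
        · exact List.mem_cons_of_mem _ (h3 k (by omega) hk2)
    · have hrn : n0 < r := lt_of_le_of_ne (hge r (by simp)) (fun h => hr h.symm)
      have hge' : ∀ x ∈ t, n0 ≤ x := fun x hx => le_of_lt (lt_trans hrn (hrt x hx))
      obtain ⟨h1, h2, h3⟩ := ih ht n0 hge'
      simp only [List.foldl_cons, if_neg hr]
      have hm : t.foldl (fun n r => if r = n then n + 1 else n) n0 = n0 := by
        by_contra hne
        have hmem : n0 ∈ t := h3 n0 le_rfl (by omega)
        have := hrt n0 hmem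
        omega
      rw [hm]
      refine ⟨le_rfl, ?_, fun k h1 h2 => absurd (lt_of_le_of_lt h1 h2) (lt_irrefl _)⟩
      intro hmem
      rcases List.mem_cons.mp hmem with h | h
      · omega
      · have := hrt n0 h; omega

-- first gap of the enumeration, as findSome? over an index range
theorem pvFirst_eq_some (xs : List String) (m : Nat) :
    ∀ (len a : Nat), a ≤ m → m < a + len →
      (∀ k, a ≤ k → k < m → xs.contains (pvName k) = true) →
      xs.contains (pvName m) = false →
      pvFirst xs (List.range' a len) = some (pvName m) := by
  intro len
  induction len with
  | zero => intro a h1 h2; omega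
  | succ len ih =>
    intro a h1 h2 hk hm
    rw [List.range'_succ]
    simp only [pvFirst, List.findSome?]
    by_cases ha : a = m
    · subst ha; rw [hm]; rfl
    · rw [hk a le_rfl (by omega)]
      exact ih (a + 1) (by omega) (by omega) (fun k hk1 hk2 => hk k (by omega) hk2) hm

-- one inner pass of A's while-loop, with prefix Char.ofNat (65+k), is pvFirst of indices 26+26k … 26+26k+25
theorem pvPass_eq (xs : List String) (k : Nat) :
    (List.range 26).findSome? (fun i =>
        let d : String := String.ofList [Char.ofNat (65 + k), Char.ofNat (65 + i)]
        if xs.contains d then none else some d)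
      = pvFirst xs (List.range' (26 + 26 * k) 26) := by
  rw [pvFirst, List.range'_eq_map_range, List.findSome?_map]
  apply pv_findSome?_congr
  intro i hi
  have hi26 : i < 26 := List.mem_range.mp hi
  simp only [Function.comp]
  rw [show 26 + 26 * k + i = 26 + 26 * k + i from rfl, pvName_big k i hi26]

theorem pvAWhile_eq (xs : List String) :
    ∀ (f k : Nat), 65 + k + f < 55296 →
      pvAWhile xs f (Char.ofNat (65 + k)) = (pvFirst xs (List.range' (26 + 26 * k) (26 * f))).getD "" := by
  intro f
  induction f with
  | zero => intro k _; rfl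
  | succ f ih =>
    intro k hk
    have hsplit : List.range' (26 + 26 * k) 26 ++ List.range' (26 + 26 * (k + 1)) (26 * f)
        = List.range' (26 + 26 * k) (26 * (f + 1)) := by
      have := @List.range'_append (26 + 26 * k) 26 (26 * f) 1
      simp only [Nat.one_mul] at this
      rw [show 26 + 26 * k + 26 = 26 + 26 * (k + 1) by ring] at this
      rw [show 26 + 26 * f = 26 * (f + 1) by ring] at this
      exact this
    rw [← hsplit]
    simp only [pvFirst]
    rw [List.findSome?_append]
    simp only [pvAWhile, pvPass_eq xs k]
    cases hpass : pvFirst xs (List.range' (26 + 26 * k) 26) with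
    | some d => simp only [pvFirst] at hpass; rw [hpass]; rfl
    | none =>
      simp only [pvFirst] at hpass
      rw [hpass]
      rw [pv_toNat_ofNat (65 + k) (by omega),
        show 65 + k + 1 = 65 + (k + 1) by ring,
        ih (k + 1) (by omega)]
      rfl

-- A's port equals the first gap of the whole enumeration (fuel never runs out on Dom inputs;
-- proved below via the 1638 bound)
theorem pvA_eq_first (xs : List String) (hx : xs ≠ []) :
    get_next_division_name xs = (pvFirst xs (List.range' 0 26026)).getD "" := by
  unfold get_next_division_name
  rw [if_neg hx]
  have hsplit : List.range' 0 26 ++ List.range' 26 26000 = List.range' 0 26026 := by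
    have := @List.range'_append 0 26 26000 1
    simpa using this
  rw [← hsplit]
  simp only [pvFirst]
  rw [List.findSome?_append]
  have hsingle : (List.range 26).findSome? (fun i =>
      let d : String := String.ofList [Char.ofNat (65 + i)]
      if xs.contains d then none else some d)
      = (List.range' 0 26).findSome? (fun n => if xs.contains (pvName n) then none else some (pvName n)) := by
    rw [← List.range_eq_range']
    apply pv_findSome?_congr
    intro i hi
    have hi26 : i < 26 := List.mem_range.mp hi
    simp only [pvName_small i hi26]
  rw [← hsingle]
  cases hpass : (List.range 26).findSome? (fun i =>
      let d : String := String.ofList [Char.ofNat (65 + i)]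
      if xs.contains d then none else some d) with
  | some d => simp
  | none =>
    simp only [Option.none_or]
    have : pvAWhile xs 1000 (Char.ofNat (65 + 0))
        = (pvFirst xs (List.range' (26 + 26 * 0) (26 * 1000))).getD "" :=
      pvAWhile_eq xs 1000 0 (by omega)
    simpa [pvFirst, show (65:Nat) + 0 = 65 from rfl] using this

-- ===== VERDICT (by name: the statement is the Claim_ definition above) =====
theorem get_next_division_name_spec : Claim_equal_get_next_division_name := by
  intro xs hdom
  unfold Spec_get_next_division_name
  by_cases hx : xs = []
  · subst hx; decide
  · -- the sorted rank list
    set l := PySem.List.sorted (PySem.Set.ofList (xs.filterMap pvRank?)) (fun x => x) false with hldef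
    have hmem : ∀ r, r ∈ l ↔ ∃ s ∈ xs, pvRank? s = some r := by
      intro r
      rw [hldef, PySem.List.mem_sorted, PySem.Set.mem_ofList, List.mem_filterMap]
    have hlt : l.Pairwise (· < ·) := by
      rw [hldef]; exact PySem.List.sorted_ofList_pairwise_lt _
    set m := l.foldl (fun n r => if r = n then n + 1 else n) 0 with hmdef
    obtain ⟨_, hnotmem, hbelow⟩ := pv_mex_fold l hlt 0 (fun r _ => Nat.zero_le r)
    -- every rank in l is ≤ 1637, so m ≤ 1638
    have hbound : ∀ r ∈ l, r ≤ 1637 := by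
      intro r hr
      obtain ⟨s, hs, hrank⟩ := (hmem r).mp hr
      have hds : pvDomStr s = true := List.all_eq_true.mp hdom s hs
      exact pvRank?_le s r hds hrank
    have hm : m ≤ 1638 := by
      by_contra hgt
      have h1638 : (1638 : Nat) ∈ l := hbelow 1638 (Nat.zero_le _) (by omega)
      have := hbound 1638 h1638
      omega
    -- the two membership transfers
    have hin : ∀ k < m, xs.contains (pvName k) = true := by
      intro k hk
      obtain ⟨s, hs, hrank⟩ := (hmem k).mp (hbelow k (Nat.zero_le _) hk)
      rw [pvName_pvRank? s k hrank] at hs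
      exact List.elem_eq_true_of_mem hs
    have hout : xs.contains (pvName m) = false := by
      rw [Bool.eq_false_iff]
      intro hc
      have hmm : pvName m ∈ xs := by
        obtain ⟨y, hy, hb⟩ := List.contains_iff_exists_mem_beq.mp hc
        rw [beq_iff_eq.mp hb]
        exact hy
      exact hnotmem ((hmem m).mpr ⟨pvName m, hmm, pvRank?_pvName m (by omega)⟩)
    -- both sides are pvName m
    rw [pvA_eq_first xs hx,
      pvFirst_eq_some xs m 26026 0 (Nat.zero_le _) (by omega) (fun k _ => hin k) hout]
    rfl
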